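-- pv_equiv track=rewrite | github.com/Plishh/Dual-Flood-GNN-Cluster | utils/cluster_utils.py | get_sliding_window_clusters
-- ===== SOURCE A (Python) =====
-- def get_sliding_window_clusters(
--     num_clusters: int,
--     clusters_per_batch: int
-- ) -> list[list[int]]:
--     """
--     Generate overlapping cluster groups using a sliding window approach.
--
--     Args:
--         num_clusters: Total number of clusters in the partition map.
--         clusters_per_batch: Number of clusters to combine per batch.
--
--     Returns:
--         List of cluster id groups. Each group overlaps with the previous by (clusters_per_batch - 1).
--     """
--     if num_clusters <= 0 or clusters_per_batch <= 0:
--         return []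
--
--     groups: list[list[int]] = []
--     for start in range(0, num_clusters - clusters_per_batch + 1):
--         group = list(range(start, start + clusters_per_batch))
--         groups.append(group)
--
--     return groups
-- ===== SOURCE B (Python) =====
-- def get_sliding_window_clusters(
--     num_clusters: int,
--     clusters_per_batch: int
-- ) -> list[list[int]]:
--     if num_clusters <= 0 or clusters_per_batch <= 0:
--         return []
--     count = num_clusters - clusters_per_batch + 1
--     if count <= 0:
--         return []
--     window = list(range(clusters_per_batch))
--     groups = [window]
--     for _ in range(count - 1):
--         window = [x + 1 for x in window]
--         groups.append(window)
--     return groups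
-- ===== Notes on version B (the rewrite author's own statement) =====
-- stated objective: alternative
-- what changed: Instead of constructing each group independently with range(start, start+k), B builds the initial window once and threads it as a live accumulator, advancing it by incrementing every element and appending each new window.
import Mathlib
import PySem

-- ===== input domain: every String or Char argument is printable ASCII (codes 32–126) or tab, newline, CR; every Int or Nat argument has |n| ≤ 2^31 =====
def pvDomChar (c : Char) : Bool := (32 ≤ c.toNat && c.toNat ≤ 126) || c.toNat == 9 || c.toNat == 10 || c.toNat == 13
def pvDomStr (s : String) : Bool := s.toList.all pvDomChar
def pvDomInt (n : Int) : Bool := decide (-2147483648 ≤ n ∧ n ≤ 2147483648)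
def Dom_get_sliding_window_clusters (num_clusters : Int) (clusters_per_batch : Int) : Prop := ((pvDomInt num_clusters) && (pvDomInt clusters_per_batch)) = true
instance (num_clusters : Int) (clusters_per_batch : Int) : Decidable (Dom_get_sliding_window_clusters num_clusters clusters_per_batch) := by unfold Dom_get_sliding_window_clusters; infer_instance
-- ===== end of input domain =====

-- B replaces per-start group construction by a live window threaded as an accumulator
-- (each step increments every element and appends the new window); alternative decomposition, same cost.

-- ===== PORT A =====
def get_sliding_window_clusters (num_clusters : Int) (clusters_per_batch : Int) : List (List Int) :=
  if num_clusters ≤ 0 ∨ clusters_per_batch ≤ 0 then []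
  else
    (PySem.List.pyRange 0 (num_clusters - clusters_per_batch + 1) 1).foldl
      (fun groups start => groups ++ [PySem.List.pyRange start (start + clusters_per_batch) 1]) []

-- ===== PORT B =====
def get_sliding_window_clusters_alt (num_clusters : Int) (clusters_per_batch : Int) : List (List Int) :=
  if num_clusters ≤ 0 ∨ clusters_per_batch ≤ 0 then []
  else
    let count := num_clusters - clusters_per_batch + 1
    if count ≤ 0 then []
    else
      let window := PySem.List.pyRange 0 clusters_per_batch 1
      ((PySem.List.pyRange 0 (count - 1) 1).foldl
        (fun (st : List Int × List (List Int)) _ =>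
          let w := st.1.map (· + 1)
          (w, st.2 ++ [w])) (window, [window])).2

-- ===== PRECONDITION & SPEC =====
def Spec_get_sliding_window_clusters (num_clusters : Int) (clusters_per_batch : Int) (out : List (List Int)) : Prop := out = get_sliding_window_clusters_alt num_clusters clusters_per_batch
instance (num_clusters : Int) (clusters_per_batch : Int) (out : List (List Int)) : Decidable (Spec_get_sliding_window_clusters num_clusters clusters_per_batch out) := by unfold Spec_get_sliding_window_clusters; infer_instance

-- ===== CLAIM (what is proved, stated in full; the proofs are below) =====
def Claim_equal_get_sliding_window_clusters : Prop := ∀ (num_clusters : Int) (clusters_per_batch : Int), Dom_get_sliding_window_clusters num_clusters clusters_per_batch → Spec_get_sliding_window_clusters num_clusters clusters_per_batch (get_sliding_window_clusters num_clusters clusters_per_batch)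

-- ===== LEMMAS AND PROOFS =====

-- Proof-only helper: the successive windows produced by repeatedly incrementing every element.
def pvWindows (w : List Int) : Nat → List (List Int)
  | 0 => []
  | n+1 => (w.map (· + 1)) :: pvWindows (w.map (· + 1)) n

-- A's fold just appends one group per start.
theorem foldA_eq_map (l : List Int) (k : Int) (acc : List (List Int)) :
    l.foldl (fun groups start => groups ++ [PySem.List.pyRange start (start + k) 1]) acc
      = acc ++ l.map (fun start => PySem.List.pyRange start (start + k) 1) := by
  induction l generalizing acc with
  | nil => simp
  | cons a t ih => simp [List.foldl_cons, ih]

-- B's fold appends pvWindows, one window per iteration.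
theorem foldB_eq_windows (l : List Int) (w : List Int) (acc : List (List Int)) :
    (l.foldl (fun (st : List Int × List (List Int)) _ =>
        (st.1.map (· + 1), st.2 ++ [st.1.map (· + 1)])) (w, acc)).2
      = acc ++ pvWindows w l.length := by
  induction l generalizing w acc with
  | nil => simp [pvWindows]
  | cons a t ih => simp [List.foldl_cons, ih, pvWindows]

-- Shifting a range by one.
theorem shift_pyRange (a b : Int) :
    (PySem.List.pyRange a b 1).map (· + 1) = PySem.List.pyRange (a+1) (b+1) 1 := by
  rw [PySem.List.pyRange_one, PySem.List.pyRange_one, List.map_map]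
  have : (b + 1 - (a + 1)) = b - a := by ring
  rw [this]
  apply List.map_congr_left
  intro j _
  simp [Function.comp]
  ring

-- The successive windows are exactly A's groups for starts a+1, …, a+m.
theorem windows_eq_map (k : Int) (m : Nat) : ∀ (a : Int),
    pvWindows (PySem.List.pyRange a (a + k) 1) m
      = (PySem.List.pyRange (a+1) (a+1+m) 1).map (fun s => PySem.List.pyRange s (s + k) 1) := by
  induction m with
  | zero =>
      intro a
      simp only [pvWindows, Nat.cast_zero, add_zero]
      rw [PySem.List.pyRange_one_eq_nil (by omega : a+1 ≤ a+1)]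
      simp
  | succ n ih =>
      intro a
      have hshift : (PySem.List.pyRange a (a + k) 1).map (· + 1)
          = PySem.List.pyRange (a+1) (a+1+k) 1 := by
        rw [shift_pyRange]; congr 1; ring_nf
      have hcons : PySem.List.pyRange (a+1) (a+1+(n+1 : Nat)) 1
          = (a+1) :: PySem.List.pyRange (a+2) (a+1+(n+1 : Nat)) 1 := by
        have := PySem.List.pyRange_one_cons (a := a+1) (b := a+1+(n+1 : Nat)) (by push_cast; omega)
        rw [this]; congr 1; ring_nf
      rw [hcons]
      simp only [pvWindows, hshift, List.map_cons]
      rw [ih (a+1)]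
      congr 3 <;> push_cast <;> ring_nf

-- ===== VERDICT (by name: the statement is the Claim_ definition above) =====
theorem get_sliding_window_clusters_spec : Claim_equal_get_sliding_window_clusters := by
  unfold Claim_equal_get_sliding_window_clusters Spec_get_sliding_window_clusters
  intro n k _
  unfold get_sliding_window_clusters get_sliding_window_clusters_alt
  by_cases hg : n ≤ 0 ∨ k ≤ 0
  · simp [hg]
  · simp only [hg, if_false]
    set c := n - k + 1 with hc
    by_cases hle : c ≤ 0
    · simp [hle, PySem.List.pyRange_one_eq_nil (by omega : c ≤ 0)]
    · simp only [hle, if_false]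
      rw [foldA_eq_map, foldB_eq_windows]
      simp only [List.nil_append, PySem.List.length_pyRange_one, List.singleton_append]
      have h0k : PySem.List.pyRange 0 k 1 = PySem.List.pyRange 0 (0 + k) 1 := by norm_num
      rw [h0k, windows_eq_map k ((c - 1 - 0).toNat) 0]
      have hcz : (0 : Int) + 1 + ((c - 1 - 0).toNat : Int) = c := by omega
      rw [hcz]
      have hcc : PySem.List.pyRange 0 c 1 = 0 :: PySem.List.pyRange 1 c 1 := by
        have := PySem.List.pyRange_one_cons (a := 0) (b := c) (by omega)
        rw [this]; norm_num
      rw [hcc, List.map_cons]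
      norm_num
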